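/- GENERATED by farm/mkstatement.py from design/units.tsv (unit `stb_vorbis_close`) and the Specs of Vorbis/Spec/*.lean — do not edit.
   THE STATEMENT of the proof unit `stb_vorbis_close`: the function `stb_vorbis_close` (11 instructions) satisfies its contract,
   given the contracts of its callees. What the names mean: Vorbis/Spec/Basic.lean. The theorem to prove:
   `theorem stb_vorbis_close_ok : Vorbis.Spec.stb_vorbis_close.Statement`. -/
import Vorbis.Spec.Alloc
namespace Vorbis.Spec.stb_vorbis_close
open X86 X86.User Asan

/-- The statement of unit `stb_vorbis_close`. -/
def Statement : Prop :=
  ∀ (Lay : Layout) (_hLay : Lay.hi = 0x1000000) (μ : Microarch) (_hμ : UserX.MicroOK μ) (u₀ : State)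
    (_hcode : HasCodeNat Lay u₀ Vorbis.L.stb_vorbis_close.entry Vorbis.Code.code_stb_vorbis_close.nat Vorbis.L.stb_vorbis_close.size)
    (_h_vorbis_deinit : ∀ (others : List Obj) (frames : List (Nat × FrameLayout)) (Blk : Block → Prop), Calls Lay μ Vorbis.WayInv (Vorbis.conv u₀) Vorbis.L.vorbis_deinit.entry (Vorbis.Spec.vorbis_deinit.spec others frames Blk))
    (_h_setup_free : ∀ (others : List Obj) (frames : List (Nat × FrameLayout)), Calls Lay μ Vorbis.WayInv (Vorbis.conv u₀) Vorbis.L.setup_free.entry (Vorbis.Spec.setup_free.spec others frames)),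
    ∀ (others : List Obj) (frames : List (Nat × FrameLayout)) (Blk : Block → Prop), Calls Lay μ Vorbis.WayInv (Vorbis.conv u₀) Vorbis.L.stb_vorbis_close.entry (Vorbis.Spec.stb_vorbis_close.spec others frames Blk)

end Vorbis.Spec.stb_vorbis_close
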